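-- pv_equiv track=rewrite | github.com/Rickderijk2002/Prescriptive-Assignment-3 | Notebook/experiment_consultancy_rul.py | get_penalty_cost
-- ===== SOURCE A (Python) =====
-- def get_penalty_cost(engine_id, completion_date, due_date):
--     '''Computes the penalty cost given the completion and due dates of an engine'''
--     if completion_date <= due_date:
--         return 0
--
--     # Get the cj value for the engine's id range
--     if 1 <= engine_id <= 25:
--         cj = 4
--     elif 26 <= engine_id <= 45:
--         cj = 2
--     elif 46 <= engine_id <= 75:
--         cj = 5
--     else:
--         cj = 6
--
--     # Penalty charged for every late day; capped daily
--     penalty = 0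
--     for day in range(due_date + 1, completion_date + 1):
--         delay = day - due_date
--         penalty += min(cj * (delay ** 2), 250)
--
--     return penalty
-- ===== SOURCE B (Python) =====
-- def get_penalty_cost(engine_id, completion_date, due_date):
--     '''Closed-form penalty: sum-of-squares formula below the daily cap, 250 per day above it'''
--     delay = completion_date - due_date
--     if delay <= 0:
--         return 0
--
--     # (cj, t) where t is the largest delay with cj * t**2 <= 250
--     if 1 <= engine_id <= 25:
--         cj, t = 4, 7
--     elif 26 <= engine_id <= 45:
--         cj, t = 2, 11
--     elif 46 <= engine_id <= 75:
--         cj, t = 5, 7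
--     else:
--         cj, t = 6, 6
--
--     k = min(delay, t)                       # days charged quadratically
--     return cj * k * (k + 1) * (2 * k + 1) // 6 + 250 * (delay - k)
-- ===== Notes on version B (the rewrite author's own statement) =====
-- stated objective: alternative
-- what changed: Replaced the per-day loop by a closed form: sum-of-squares formula for the days below the 250 cap plus 250 times the number of capped days.
import Mathlib
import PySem

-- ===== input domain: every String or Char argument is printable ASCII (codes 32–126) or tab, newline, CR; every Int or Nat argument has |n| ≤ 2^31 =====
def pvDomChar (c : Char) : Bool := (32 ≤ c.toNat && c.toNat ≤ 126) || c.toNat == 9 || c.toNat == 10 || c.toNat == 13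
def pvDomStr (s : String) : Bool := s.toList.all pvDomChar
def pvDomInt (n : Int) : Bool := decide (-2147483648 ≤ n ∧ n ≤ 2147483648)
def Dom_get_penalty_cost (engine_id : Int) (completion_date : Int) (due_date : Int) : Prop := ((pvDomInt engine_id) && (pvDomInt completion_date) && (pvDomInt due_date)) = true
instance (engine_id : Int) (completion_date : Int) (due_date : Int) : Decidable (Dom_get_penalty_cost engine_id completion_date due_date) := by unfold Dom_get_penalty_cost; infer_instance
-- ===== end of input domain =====

-- B replaces A's per-day loop by a closed form (sum of squares below the cap, 250 per capped day); objective: alternative.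

-- ===== PORT A =====
def get_penalty_cost (engine_id : Int) (completion_date : Int) (due_date : Int) : Int :=
  if completion_date ≤ due_date then 0
  else
    let cj : Int :=
      if 1 ≤ engine_id ∧ engine_id ≤ 25 then 4
      else if 26 ≤ engine_id ∧ engine_id ≤ 45 then 2
      else if 46 ≤ engine_id ∧ engine_id ≤ 75 then 5
      else 6
    (PySem.List.pyRange (due_date + 1) (completion_date + 1) 1).foldl
      (fun penalty day => penalty + min (cj * (day - due_date) ^ 2) 250) 0

-- ===== PORT B =====
def get_penalty_cost_alt (engine_id : Int) (completion_date : Int) (due_date : Int) : Int :=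
  let delay := completion_date - due_date
  if delay ≤ 0 then 0
  else
    let p : Int × Int :=
      if 1 ≤ engine_id ∧ engine_id ≤ 25 then (4, 7)
      else if 26 ≤ engine_id ∧ engine_id ≤ 45 then (2, 11)
      else if 46 ≤ engine_id ∧ engine_id ≤ 75 then (5, 7)
      else (6, 6)
    let cj := p.1
    let t := p.2
    let k := min delay t
    PySem.Int.floordiv (cj * k * (k + 1) * (2 * k + 1)) 6 + 250 * (delay - k)

-- ===== PRECONDITION & SPEC =====
def Spec_get_penalty_cost (engine_id : Int) (completion_date : Int) (due_date : Int) (out : Int) : Prop := out = get_penalty_cost_alt engine_id completion_date due_date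
instance (engine_id : Int) (completion_date : Int) (due_date : Int) (out : Int) : Decidable (Spec_get_penalty_cost engine_id completion_date due_date out) := by unfold Spec_get_penalty_cost; infer_instance

-- ===== CLAIM (what is proved, stated in full; the proofs are below) =====
def Claim_equal_get_penalty_cost : Prop := ∀ (engine_id : Int) (completion_date : Int) (due_date : Int), Dom_get_penalty_cost engine_id completion_date due_date → Spec_get_penalty_cost engine_id completion_date due_date (get_penalty_cost engine_id completion_date due_date)

-- ===== LEMMAS AND PROOFS =====

/-- Sum of the first `n` squares, as an Int. -/
def sqSum : Nat → Int
  | 0 => 0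
  | n + 1 => sqSum n + ((n : Int) + 1) ^ 2

lemma sqSum_closed (m : Nat) : (m : Int) * ((m : Int) + 1) * (2 * (m : Int) + 1) = 6 * sqSum m := by
  induction m with
  | zero => simp [sqSum]
  | succ n ih =>
    simp only [sqSum]
    push_cast
    push_cast at ih
    nlinarith [ih]

/-- The value A's loop accumulates after `n` late days. -/
def gLoop (cj : Int) : Nat → Int
  | 0 => 0
  | n + 1 => gLoop cj n + min (cj * ((n : Int) + 1) ^ 2) 250

lemma loopA_eq_gLoop (cj : Int) (n : Nat) (due : Int) :
    (PySem.List.pyRange (due + 1) (due + 1 + n) 1).foldl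
      (fun penalty day => penalty + min (cj * (day - due) ^ 2) 250) 0 = gLoop cj n := by
  induction n with
  | zero =>
    have : due + 1 + ((0:Nat):Int) = due + 1 := by simp
    rw [this, PySem.List.pyRange_one_eq_nil (by omega)]
    simp [gLoop]
  | succ m ih =>
    have hsplit : due + 1 + ((m + 1 : Nat) : Int) = (due + 1 + (m : Nat)) + 1 := by push_cast; ring
    rw [hsplit, PySem.List.pyRange_one_succ_right (by omega), List.foldl_append, ih]
    simp [gLoop]
    ring_nf

lemma gLoop_closed (cj : Int) (tn : Nat)
    (h1 : cj * ((tn : Int)) ^ 2 ≤ 250) (h2 : 250 ≤ cj * ((tn : Int) + 1) ^ 2) (n : Nat) :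
    gLoop cj n = cj * sqSum (min n tn) + 250 * ((n : Int) - (min n tn : Nat)) := by
  induction n with
  | zero => simp [gLoop, sqSum]
  | succ m ih =>
    rw [gLoop, ih]
    by_cases hm : m + 1 ≤ tn
    · have hmin1 : min (m + 1) tn = m + 1 := by omega
      have hmin0 : min m tn = m := by omega
      have hle : cj * ((m : Int) + 1) ^ 2 ≤ 250 := by
        have hc : (m : Int) + 1 ≤ (tn : Int) := by exact_mod_cast hm
        nlinarith
      rw [hmin1, hmin0, min_eq_left hle]
      simp [sqSum]
      ring
    · have hmin1 : min (m + 1) tn = tn := by omega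
      have hmin0 : min m tn = tn := by omega
      have hge : 250 ≤ cj * ((m : Int) + 1) ^ 2 := by
        have hc : (tn : Int) + 1 ≤ (m : Int) + 1 := by
          have : tn ≤ m := by omega
          exact_mod_cast Nat.succ_le_succ this
        nlinarith
      rw [hmin1, hmin0, min_eq_right hge]
      push_cast
      ring

lemma bridge (cj t : Int) (ht : 0 ≤ t)
    (h1 : cj * t ^ 2 ≤ 250) (h2 : 250 ≤ cj * (t + 1) ^ 2)
    (c d : Int) (h : d < c) :
    (PySem.List.pyRange (d + 1) (c + 1) 1).foldl
      (fun penalty day => penalty + min (cj * (day - d) ^ 2) 250) 0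
    = PySem.Int.floordiv (cj * min (c - d) t * (min (c - d) t + 1) *
        (2 * min (c - d) t + 1)) 6 + 250 * ((c - d) - min (c - d) t) := by
  set tn : Nat := t.toNat with htn
  have htc : t = (tn : Int) := by omega
  set n : Nat := (c - d).toNat with hn
  have hcd : c - d = (n : Int) := by omega
  have hc1 : c + 1 = d + 1 + (n : Int) := by omega
  rw [hc1, loopA_eq_gLoop,
    gLoop_closed cj tn (by rw [htc] at h1; exact h1) (by rw [htc] at h2; exact h2) n,
    hcd, htc]
  have hminc : min ((n : Int)) ((tn : Int)) = ((min n tn : Nat) : Int) := by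
    exact_mod_cast (Nat.cast_min (α := Int) (m := n) (n := tn)).symm
  rw [hminc]
  congr 1
  have hprod : cj * ((min n tn : Nat) : Int) * (((min n tn : Nat) : Int) + 1) *
      (2 * ((min n tn : Nat) : Int) + 1) = 6 * (cj * sqSum (min n tn)) := by
    have := sqSum_closed (min n tn)
    nlinarith [this]
  rw [hprod, PySem.Int.floordiv_eq_ediv_of_pos (by norm_num : (0:Int) < 6),
    Int.mul_ediv_cancel_left _ (by norm_num : (6:Int) ≠ 0)]

-- ===== VERDICT (by name: the statement is the Claim_ definition above) =====
theorem get_penalty_cost_spec : Claim_equal_get_penalty_cost := by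
  intro e c d _
  unfold Spec_get_penalty_cost get_penalty_cost get_penalty_cost_alt
  by_cases hcd : c ≤ d
  · simp [hcd, show c - d ≤ 0 by omega]
  · have h : d < c := by omega
    simp only [hcd, if_neg (show ¬ c - d ≤ 0 by omega), if_false]
    by_cases h1 : 1 ≤ e ∧ e ≤ 25
    · simp only [if_pos h1]
      exact bridge 4 7 (by norm_num) (by norm_num) (by norm_num) c d h
    · by_cases h2 : 26 ≤ e ∧ e ≤ 45
      · simp only [if_neg h1, if_pos h2]
        exact bridge 2 11 (by norm_num) (by norm_num) (by norm_num) c d h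
      · by_cases h3 : 46 ≤ e ∧ e ≤ 75
        · simp only [if_neg h1, if_neg h2, if_pos h3]
          exact bridge 5 7 (by norm_num) (by norm_num) (by norm_num) c d h
        · simp only [if_neg h1, if_neg h2, if_neg h3]
          exact bridge 6 6 (by norm_num) (by norm_num) (by norm_num) c d h
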